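-- pv_equiv track=rewrite | github.com/william8341/agent-one | skills/oracle-explain-plan/scripts/oracle_explain_plan.py | format_plan_for_llm
-- ===== SOURCE A (Python) =====
-- def format_plan_for_llm(plan_text, sql):
--     """格式化执行计划，便于 LLM 分析"""
--     lines = plan_text.strip().split("\n")
--
--     # 提取关键信息
--     sections = {
--         "plan": [],
--         "notes": [],
--     }
--
--     current_section = "plan"
--     for line in lines:
--         line = line.strip()
--         if not line:
--             continue
--         # 过滤掉常见干扰信息
--         if any(
--             x in line for x in ["Explained", "SQL*Plus", "Copyright", "Plan hash value"]
--         ):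
--             continue
--         if "Note" in line or "---" in line:
--             current_section = "notes"
--             continue
--         sections[current_section].append(line)
--
--     return {
--         "sql": sql,
--         "plan_text": "\n".join(sections["plan"]),
--         "notes": "\n".join(sections["notes"]),
--     }
-- ===== SOURCE B (Python) =====
-- def format_plan_for_llm(plan_text, sql):
--     """格式化执行计划，便于 LLM 分析"""
--     noise = ("Explained", "SQL*Plus", "Copyright", "Plan hash value")
--     cleaned = [s for s in (l.strip() for l in plan_text.strip().split("\n"))
--                if s and not any(x in s for x in noise)]
--
--     def is_marker(s):
--         return "Note" in s or "---" in s
--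
--     split = next((i for i, s in enumerate(cleaned) if is_marker(s)), len(cleaned))
--     return {
--         "sql": sql,
--         "plan_text": "\n".join(cleaned[:split]),
--         "notes": "\n".join(s for s in cleaned[split:] if not is_marker(s)),
--     }
-- ===== Notes on version B (the rewrite author's own statement) =====
-- stated objective: simpler
-- what changed: Replaces A's one-pass current_section state machine with a filter-then-split decomposition: build the cleaned line list once, find the first marker line, take the prefix as the plan and filter markers out of the rest for the notes.
import Mathlib
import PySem

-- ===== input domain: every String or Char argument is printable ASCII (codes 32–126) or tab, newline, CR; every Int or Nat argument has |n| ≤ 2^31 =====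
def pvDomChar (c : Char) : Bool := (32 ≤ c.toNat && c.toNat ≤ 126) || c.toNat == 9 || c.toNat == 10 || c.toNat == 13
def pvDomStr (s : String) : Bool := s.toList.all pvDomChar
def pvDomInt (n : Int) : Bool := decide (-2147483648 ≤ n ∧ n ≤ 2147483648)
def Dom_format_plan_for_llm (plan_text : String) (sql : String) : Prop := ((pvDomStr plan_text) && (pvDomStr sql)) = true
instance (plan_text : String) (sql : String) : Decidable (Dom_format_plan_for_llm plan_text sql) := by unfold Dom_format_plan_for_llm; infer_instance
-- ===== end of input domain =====

-- B rebuilds the result by a filter-then-split decomposition (clean once, find the first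
-- marker, take/drop around it) instead of A's one-pass section state machine; objective:
-- simpler, same O(n) cost.


-- ===== PORT A =====
-- any(x in line for x in ["Explained", "SQL*Plus", "Copyright", "Plan hash value"])
def pvNoiseA (line : String) : Bool :=
  ["Explained", "SQL*Plus", "Copyright", "Plan hash value"].any (fun x => PySem.Str.isIn x line)

-- one iteration of A's loop; state = (sections["plan"], sections["notes"], current_section == "notes")
def pvStepA (st : List String × List String × Bool) (rawLine : String) :
    List String × List String × Bool :=
  let line := PySem.Str.strip rawLine
  if line = "" then st
  else if pvNoiseA line then st
  else if PySem.Str.isIn "Note" line || PySem.Str.isIn "---" line then (st.1, st.2.1, true)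
  else if st.2.2 then (st.1, st.2.1 ++ [line], true)
  else (st.1 ++ [line], st.2.1, false)

def format_plan_for_llm (plan_text : String) (sql : String) : List (String × String) :=
  let lines := ((PySem.Str.split? (PySem.Str.strip plan_text) "\n").getD [])
  let st := lines.foldl pvStepA ([], [], false)
  [("sql", sql), ("plan_text", PySem.Str.join "\n" st.1), ("notes", PySem.Str.join "\n" st.2.1)]

-- ===== PORT B =====
def pvNoiseB (s : String) : Bool :=
  ["Explained", "SQL*Plus", "Copyright", "Plan hash value"].any (fun x => PySem.Str.isIn x s)

def pvMarkerB (s : String) : Bool := PySem.Str.isIn "Note" s || PySem.Str.isIn "---" s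

def format_plan_for_llm_alt (plan_text : String) (sql : String) : List (String × String) :=
  let cleaned := ((((PySem.Str.split? (PySem.Str.strip plan_text) "\n").getD [])).map PySem.Str.strip).filter
    (fun s => s != "" && !pvNoiseB s)
  let split := cleaned.findIdx pvMarkerB
  [("sql", sql),
   ("plan_text", PySem.Str.join "\n" (cleaned.take split)),
   ("notes", PySem.Str.join "\n" ((cleaned.drop split).filter (fun s => !pvMarkerB s)))]

-- ===== PRECONDITION & SPEC =====
def Spec_format_plan_for_llm (plan_text : String) (sql : String) (out : List (String × String)) : Prop := out = format_plan_for_llm_alt plan_text sql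
instance (plan_text : String) (sql : String) (out : List (String × String)) : Decidable (Spec_format_plan_for_llm plan_text sql out) := by unfold Spec_format_plan_for_llm; infer_instance

-- ===== CLAIM (what is proved, stated in full; the proofs are below) =====
def Claim_equal_format_plan_for_llm : Prop := ∀ (plan_text : String) (sql : String), Dom_format_plan_for_llm plan_text sql → Spec_format_plan_for_llm plan_text sql (format_plan_for_llm plan_text sql)

-- ===== LEMMAS AND PROOFS =====

-- the cleaned list B builds from a list of raw lines
def pvClean (ls : List String) : List String :=
  (ls.map PySem.Str.strip).filter (fun s => s != "" && !pvNoiseB s)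

theorem pvClean_cons (a : String) (ls : List String) :
    pvClean (a :: ls) =
      if (PySem.Str.strip a != "" && !pvNoiseB (PySem.Str.strip a)) then
        PySem.Str.strip a :: pvClean ls
      else pvClean ls := by
  simp only [pvClean, List.map_cons, List.filter_cons]

-- once current_section = "notes", A just appends every surviving non-marker line to notes
theorem pvLoopA_true (ls : List String) (p n : List String) :
    ls.foldl pvStepA (p, n, true) =
      (p, n ++ (pvClean ls).filter (fun s => !pvMarkerB s), true) := by
  induction ls generalizing n with
  | nil => simp [pvClean]
  | cons a ls ih =>
    rw [List.foldl_cons, pvClean_cons]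
    simp only [pvStepA]
    by_cases he : PySem.Str.strip a = ""
    · simp [he, ih]
    · by_cases hn : pvNoiseA (PySem.Str.strip a)
      · have hn' : pvNoiseB (PySem.Str.strip a) := hn
        simp [he, hn, hn', ih]
      · have hn' : ¬ pvNoiseB (PySem.Str.strip a) = true := hn
        have hc : (PySem.Str.strip a != "" && !pvNoiseB (PySem.Str.strip a)) = true := by
          simp [he, hn']
        by_cases hm : (PySem.Str.isIn "Note" (PySem.Str.strip a) || PySem.Str.isIn "---" (PySem.Str.strip a)) = true
        · have hm' : pvMarkerB (PySem.Str.strip a) = true := hm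
          rw [if_neg he, if_neg hn, if_pos hm, if_pos hc, ih, List.filter_cons]
          simp [hm']
        · have hm' : pvMarkerB (PySem.Str.strip a) = false := by
            exact (Bool.not_eq_true _).mp hm
          rw [if_neg he, if_neg hn, if_neg hm, if_pos hc, List.filter_cons]
          simp [hm', ih]

-- while current_section = "plan", A's fold is B's take/drop around the first marker
theorem pvLoopA_false (ls : List String) (p n : List String) :
    ls.foldl pvStepA (p, n, false) =
      (p ++ (pvClean ls).take ((pvClean ls).findIdx pvMarkerB),
       n ++ ((pvClean ls).drop ((pvClean ls).findIdx pvMarkerB)).filter (fun s => !pvMarkerB s),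
       (pvClean ls).any pvMarkerB) := by
  induction ls generalizing p n with
  | nil => simp [pvClean]
  | cons a ls ih =>
    rw [List.foldl_cons, pvClean_cons]
    simp only [pvStepA]
    by_cases he : PySem.Str.strip a = ""
    · simp [he, ih]
    · by_cases hn : pvNoiseA (PySem.Str.strip a)
      · have hn' : pvNoiseB (PySem.Str.strip a) := hn
        simp [he, hn, hn', ih]
      · have hn' : ¬ pvNoiseB (PySem.Str.strip a) = true := hn
        have hc : (PySem.Str.strip a != "" && !pvNoiseB (PySem.Str.strip a)) = true := by
          simp [he, hn']
        by_cases hm : (PySem.Str.isIn "Note" (PySem.Str.strip a) || PySem.Str.isIn "---" (PySem.Str.strip a)) = true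
        · have hm' : pvMarkerB (PySem.Str.strip a) = true := hm
          rw [if_neg he, if_neg hn, if_pos hm, if_pos hc, pvLoopA_true]
          simp [List.findIdx_cons, hm']
        · have hm' : pvMarkerB (PySem.Str.strip a) = false := by
            exact (Bool.not_eq_true _).mp hm
          rw [if_neg he, if_neg hn, if_neg hm, if_pos hc]
          simp [ih, List.findIdx_cons, hm', List.append_assoc]

-- ===== VERDICT (by name: the statement is the Claim_ definition above) =====
theorem format_plan_for_llm_spec : Claim_equal_format_plan_for_llm := by
  intro plan_text sql _
  unfold Spec_format_plan_for_llm format_plan_for_llm format_plan_for_llm_alt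
  simp only [pvLoopA_false, pvClean, List.nil_append]
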